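-- pv_equiv track=rewrite | github.com/dw8yhmnzb6-cmyk/Bidblitz- | backend/routers/daily_streak.py | get_reward_for_day
-- ===== SOURCE A (Python) =====
-- def get_reward_for_day(day: int) -> int:
--     if day <= 0:
--         return 1
--     if day == 1:
--         return 1
--     if day == 2:
--         return 2
--     if day == 3:
--         return 3
--     if day == 4:
--         return 4
--     if day == 5:
--         return 5
--     if day == 6:
--         return 7
--     if day == 7:
--         return 10  # Weekly bonus!
--     # After week 1, cycle with bonuses
--     week_num = (day - 1) // 7
--     day_in_week = ((day - 1) % 7) + 1
--     base_reward = get_reward_for_day(day_in_week)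
--     return base_reward + week_num * 2  # +2 per week bonus
-- ===== SOURCE B (Python) =====
-- def get_reward_for_day(day: int) -> int:
--     if day <= 0:
--         return 1
--     week, r = divmod(day - 1, 7)
--     # within-week reward is r+1, bumped by +1 on the 6th day and +3 on the 7th
--     return r + 1 + (r == 5) + 3 * (r == 6) + 2 * week
-- ===== Notes on version B (the rewrite author's own statement) =====
-- stated objective: simpler
-- what changed: Replaces the seven-way if cascade and the recursive weekly call with a single closed-form arithmetic expression: divmod(day-1,7) and the base reward r+1 with boolean bumps (r==5)+3*(r==6), no table, no branching beyond the day<=0 guard, no recursion.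
import Mathlib
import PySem

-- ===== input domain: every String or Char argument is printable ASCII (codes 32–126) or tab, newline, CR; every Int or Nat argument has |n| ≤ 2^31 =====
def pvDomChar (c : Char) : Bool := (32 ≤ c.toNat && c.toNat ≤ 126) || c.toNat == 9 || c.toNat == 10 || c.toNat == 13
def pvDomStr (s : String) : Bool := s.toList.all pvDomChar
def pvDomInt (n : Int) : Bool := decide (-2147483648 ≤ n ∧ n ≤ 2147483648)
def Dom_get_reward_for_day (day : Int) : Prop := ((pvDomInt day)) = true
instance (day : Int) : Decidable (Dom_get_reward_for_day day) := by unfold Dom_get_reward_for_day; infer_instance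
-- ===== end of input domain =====

-- B replaces A's seven-way if cascade and recursive weekly-bonus call with one closed-form
-- arithmetic expression (divmod plus boolean bumps) — objective: simpler.

-- ===== PORT A =====
def get_reward_for_day (day : Int) : Int :=
  if day ≤ 0 then 1
  else if day = 1 then 1
  else if day = 2 then 2
  else if day = 3 then 3
  else if day = 4 then 4
  else if day = 5 then 5
  else if day = 6 then 7
  else if day = 7 then 10
  else
    let week_num := PySem.Int.floordiv (day - 1) 7
    let day_in_week := PySem.Int.mod (day - 1) 7 + 1
    let base_reward := get_reward_for_day day_in_week
    base_reward + week_num * 2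
termination_by day.toNat
decreasing_by
  have h := PySem.Int.mod_eq_emod_of_pos (a := day - 1) (b := 7) (by norm_num)
  omega

-- ===== PORT B =====
-- divmod(day-1, 7): here day-1 ≥ 0 and 7 > 0, so floordiv/mod are exact.
def get_reward_for_day_alt (day : Int) : Int :=
  if day ≤ 0 then 1
  else
    let week := PySem.Int.floordiv (day - 1) 7
    let r := PySem.Int.mod (day - 1) 7
    r + 1 + (if r = 5 then 1 else 0) + 3 * (if r = 6 then 1 else 0) + 2 * week

-- ===== PRECONDITION & SPEC =====
def Spec_get_reward_for_day (day : Int) (out : Int) : Prop := out = get_reward_for_day_alt day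
instance (day : Int) (out : Int) : Decidable (Spec_get_reward_for_day day out) := by unfold Spec_get_reward_for_day; infer_instance

-- ===== CLAIM =====
def Claim_equal_get_reward_for_day : Prop := ∀ (day : Int), Dom_get_reward_for_day day → Spec_get_reward_for_day day (get_reward_for_day day)

-- ===== LEMMAS AND PROOFS =====

-- On days 1..7 A's cascade returns exactly B's closed-form base reward at r = day-1.
theorem get_reward_small (d : Int) (h1 : 1 ≤ d) (h7 : d ≤ 7) :
    get_reward_for_day d =
      (d - 1) + 1 + (if d - 1 = 5 then 1 else 0) + 3 * (if d - 1 = 6 then 1 else 0) := by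
  interval_cases d <;> rw [get_reward_for_day] <;> decide

theorem get_reward_eq (day : Int) :
    get_reward_for_day day = get_reward_for_day_alt day := by
  by_cases hle : day ≤ 0
  · rw [get_reward_for_day]
    simp [get_reward_for_day_alt, hle]
  · rw [not_le] at hle
    have hm := PySem.Int.mod_eq_emod_of_pos (a := day - 1) (b := 7) (by norm_num)
    have hfd := PySem.Int.floordiv_eq_ediv_of_pos (a := day - 1) (b := 7) (by norm_num)
    by_cases hsmall : day ≤ 7
    · have hm' : PySem.Int.mod (day - 1) 7 = day - 1 := by rw [hm]; omega
      have hd : PySem.Int.floordiv (day - 1) 7 = 0 := by rw [hfd]; omega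
      rw [get_reward_small day (by omega) hsmall]
      simp only [get_reward_for_day_alt, hm', hd, if_neg (by omega : ¬ day ≤ 0)]
      ring
    · rw [not_le] at hsmall
      have h1 := Int.emod_nonneg (day - 1) (by norm_num : (7:Int) ≠ 0)
      have h2 := Int.emod_lt_of_pos (day - 1) (by norm_num : (0:Int) < 7)
      rw [get_reward_for_day]
      have hne : ∀ k : Int, 1 ≤ k → k ≤ 7 → day ≠ k := by omega
      rw [if_neg (by omega), if_neg (hne 1 (by norm_num) (by norm_num)),
          if_neg (hne 2 (by norm_num) (by norm_num)), if_neg (hne 3 (by norm_num) (by norm_num)),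
          if_neg (hne 4 (by norm_num) (by norm_num)), if_neg (hne 5 (by norm_num) (by norm_num)),
          if_neg (hne 6 (by norm_num) (by norm_num)), if_neg (hne 7 (by norm_num) (by norm_num))]
      simp only []
      rw [get_reward_small (PySem.Int.mod (day - 1) 7 + 1) (by omega) (by omega)]
      simp only [get_reward_for_day_alt, if_neg (by omega : ¬ day ≤ 0)]
      ring_nf

-- ===== VERDICT =====
theorem get_reward_for_day_spec : Claim_equal_get_reward_for_day := by
  intro day _
  exact get_reward_eq day
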